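-- pv_equiv track=rewrite | github.com/VEGAProductionsBN/ComputingProject | Visualisation/app.py | infer_segment_intent
-- ===== SOURCE A (Python) =====
-- def infer_segment_intent(tokens):
--     intent_rules = {
--         "session_setup": {"start", "session", "initial", "begin"},
--         "device_control": {"turn", "on", "off", "switch", "click", "button", "press"},
--         "light_adjustment": {"brightness", "color", "light", "temperature", "hs"},
--         "session_end": {"end", "finish", "stop", "done", "complete"},
--     }
--
--     scores = {
--         intent: len(rule_words.intersection(tokens))
--         for intent, rule_words in intent_rules.items()
--     }
--     best_intent = max(scores, key=scores.get)
--     return best_intent if scores[best_intent] > 0 else "narration"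
-- ===== SOURCE B (Python) =====
-- _INTENTS = ["session_setup", "device_control", "light_adjustment", "session_end"]
--
-- _WORD_TO_INTENT = {
--     word: intent
--     for intent, words in [
--         ("session_setup", ["start", "session", "initial", "begin"]),
--         ("device_control", ["turn", "on", "off", "switch", "click", "button", "press"]),
--         ("light_adjustment", ["brightness", "color", "light", "temperature", "hs"]),
--         ("session_end", ["end", "finish", "stop", "done", "complete"]),
--     ]
--     for word in words
-- }
--
--
-- def infer_segment_intent(tokens):
--     scores = {intent: 0 for intent in _INTENTS}
--     for tok in set(tokens):
--         intent = _WORD_TO_INTENT.get(tok)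
--         if intent is not None:
--             scores[intent] += 1
--     best = max(scores, key=scores.get)
--     return best if scores[best] > 0 else "narration"
-- ===== Notes on version B (the rewrite author's own statement) =====
-- stated objective: alternative
-- what changed: B replaces the four per-intent set intersections with an inverted word-to-intent index and a single counting pass over the distinct tokens, then picks the best pre-seeded intent in the same insertion order.
import Mathlib
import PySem

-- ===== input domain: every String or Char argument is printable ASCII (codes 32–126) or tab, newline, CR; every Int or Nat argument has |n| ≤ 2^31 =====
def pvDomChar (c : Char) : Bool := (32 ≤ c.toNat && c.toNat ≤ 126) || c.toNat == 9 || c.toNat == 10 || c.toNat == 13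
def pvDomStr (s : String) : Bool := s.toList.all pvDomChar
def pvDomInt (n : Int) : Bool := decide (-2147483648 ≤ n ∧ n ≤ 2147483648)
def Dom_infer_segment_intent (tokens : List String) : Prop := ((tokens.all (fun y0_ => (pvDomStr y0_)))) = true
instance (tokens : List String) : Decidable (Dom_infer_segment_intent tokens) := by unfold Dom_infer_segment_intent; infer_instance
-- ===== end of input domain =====

-- B replaces the per-intent set intersections by an inverted word→intent index and a single
-- counting pass over the distinct tokens (objective: alternative decomposition, same result).


-- ===== PORT A =====
def infer_segment_intent (tokens : List String) : String :=
  let intent_rules : List (String × PySem.Set String) :=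
    [("session_setup", PySem.Set.ofList ["start", "session", "initial", "begin"]),
     ("device_control", PySem.Set.ofList ["turn", "on", "off", "switch", "click", "button", "press"]),
     ("light_adjustment", PySem.Set.ofList ["brightness", "color", "light", "temperature", "hs"]),
     ("session_end", PySem.Set.ofList ["end", "finish", "stop", "done", "complete"])]
  let scores : PySem.Dict String Int :=
    intent_rules.foldl
      (fun d p => d.insert p.1 (PySem.Set.len (PySem.Set.inter p.2 tokens))) PySem.Dict.empty
  -- max(scores, key=scores.get): keys are nonempty and all present, so getD is exact here
  let best : String :=
    (PySem.List.max? (PySem.Dict.keys scores) (fun k => PySem.Dict.getD scores k 0)).getD ""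
  if PySem.Dict.getD scores best 0 > 0 then best else "narration"

-- ===== PORT B =====
def pvIntents : List String :=
  ["session_setup", "device_control", "light_adjustment", "session_end"]

def pvWordToIntent : PySem.Dict String String := PySem.Dict.ofList
  [("start", "session_setup"), ("session", "session_setup"),
   ("initial", "session_setup"), ("begin", "session_setup"),
   ("turn", "device_control"), ("on", "device_control"), ("off", "device_control"),
   ("switch", "device_control"), ("click", "device_control"),
   ("button", "device_control"), ("press", "device_control"),
   ("brightness", "light_adjustment"), ("color", "light_adjustment"),
   ("light", "light_adjustment"), ("temperature", "light_adjustment"),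
   ("hs", "light_adjustment"),
   ("end", "session_end"), ("finish", "session_end"), ("stop", "session_end"),
   ("done", "session_end"), ("complete", "session_end")]

def infer_segment_intent_alt (tokens : List String) : String :=
  let scores0 : PySem.Dict String Int :=
    pvIntents.foldl (fun d i => d.insert i 0) PySem.Dict.empty
  let scores : PySem.Dict String Int :=
    (PySem.Set.ofList tokens).foldl
      (fun d tok =>
        match PySem.Dict.get? pvWordToIntent tok with
        | some intent => PySem.Dict.modify d intent 0 (fun v => v + 1)
        | none => d) scores0
  let best : String :=
    (PySem.List.max? (PySem.Dict.keys scores) (fun k => PySem.Dict.getD scores k 0)).getD ""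
  if PySem.Dict.getD scores best 0 > 0 then best else "narration"

-- ===== PRECONDITION & SPEC =====
def Spec_infer_segment_intent (tokens : List String) (out : String) : Prop := out = infer_segment_intent_alt tokens
instance (tokens : List String) (out : String) : Decidable (Spec_infer_segment_intent tokens out) := by unfold Spec_infer_segment_intent; infer_instance

-- ===== CLAIM (what is proved, stated in full; the proofs are below) =====
def Claim_equal_infer_segment_intent : Prop := ∀ (tokens : List String), Dom_infer_segment_intent tokens → Spec_infer_segment_intent tokens (infer_segment_intent tokens)

-- ===== LEMMAS AND PROOFS =====

-- the tail shared by both algorithms (proof helper only): pick the best key, threshold at 0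
def pvTail (scores : PySem.Dict String Int) : String :=
  let best : String :=
    (PySem.List.max? (PySem.Dict.keys scores) (fun k => PySem.Dict.getD scores k 0)).getD ""
  if PySem.Dict.getD scores best 0 > 0 then best else "narration"

def pvR1 : List String := ["start", "session", "initial", "begin"]
def pvR2 : List String := ["turn", "on", "off", "switch", "click", "button", "press"]
def pvR3 : List String := ["brightness", "color", "light", "temperature", "hs"]
def pvR4 : List String := ["end", "finish", "stop", "done", "complete"]

def pvDictOf (a b c e : Int) : PySem.Dict String Int :=
  ⟨[("session_setup", a), ("device_control", b), ("light_adjustment", c), ("session_end", e)]⟩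

lemma pvA_eq (tokens : List String) :
    infer_segment_intent tokens =
      pvTail (pvDictOf
        ((pvR1.filter (fun x => tokens.contains x)).length : Int)
        ((pvR2.filter (fun x => tokens.contains x)).length : Int)
        ((pvR3.filter (fun x => tokens.contains x)).length : Int)
        ((pvR4.filter (fun x => tokens.contains x)).length : Int)) := by
  rfl

set_option maxRecDepth 4096 in
-- what the inverted index returns, as a membership case split
lemma pvIndex_get (t : String) :
    PySem.Dict.get? pvWordToIntent t =
      if t ∈ pvR1 then some "session_setup"
      else if t ∈ pvR2 then some "device_control"
      else if t ∈ pvR3 then some "light_adjustment"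
      else if t ∈ pvR4 then some "session_end"
      else none := by
  have h : pvWordToIntent = ⟨[("start", "session_setup"), ("session", "session_setup"),
   ("initial", "session_setup"), ("begin", "session_setup"),
   ("turn", "device_control"), ("on", "device_control"), ("off", "device_control"),
   ("switch", "device_control"), ("click", "device_control"),
   ("button", "device_control"), ("press", "device_control"),
   ("brightness", "light_adjustment"), ("color", "light_adjustment"),
   ("light", "light_adjustment"), ("temperature", "light_adjustment"),
   ("hs", "light_adjustment"),
   ("end", "session_end"), ("finish", "session_end"), ("stop", "session_end"),
   ("done", "session_end"), ("complete", "session_end")]⟩ := by rfl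
  rw [h]
  by_cases h1 : t ∈ pvR1
  · rcases (by simpa [pvR1] using h1 : t = "start" ∨ t = "session" ∨ t = "initial" ∨ t = "begin")
      with rfl | rfl | rfl | rfl <;> decide
  · by_cases h2 : t ∈ pvR2
    · rcases (by simpa [pvR2] using h2 : t = "turn" ∨ t = "on" ∨ t = "off" ∨ t = "switch" ∨
        t = "click" ∨ t = "button" ∨ t = "press")
        with rfl | rfl | rfl | rfl | rfl | rfl | rfl <;> decide
    · by_cases h3 : t ∈ pvR3
      · rcases (by simpa [pvR3] using h3 : t = "brightness" ∨ t = "color" ∨ t = "light" ∨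
          t = "temperature" ∨ t = "hs") with rfl | rfl | rfl | rfl | rfl <;> decide
      · by_cases h4 : t ∈ pvR4
        · rcases (by simpa [pvR4] using h4 : t = "end" ∨ t = "finish" ∨ t = "stop" ∨
            t = "done" ∨ t = "complete") with rfl | rfl | rfl | rfl | rfl <;> decide
        · simp only [h1, h2, h3, h4, if_false]
          have hf : List.find? (fun p => p.1 == t)
              ([("start", "session_setup"), ("session", "session_setup"),
                ("initial", "session_setup"), ("begin", "session_setup"),
                ("turn", "device_control"), ("on", "device_control"), ("off", "device_control"),
                ("switch", "device_control"), ("click", "device_control"),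
                ("button", "device_control"), ("press", "device_control"),
                ("brightness", "light_adjustment"), ("color", "light_adjustment"),
                ("light", "light_adjustment"), ("temperature", "light_adjustment"),
                ("hs", "light_adjustment"),
                ("end", "session_end"), ("finish", "session_end"), ("stop", "session_end"),
                ("done", "session_end"), ("complete", "session_end")] : List (String × String)) =
              none := by
            rw [List.find?_eq_none]
            intro p hp
            simp only [List.mem_cons, List.not_mem_nil, or_false] at hp
            rcases hp with rfl|rfl|rfl|rfl|rfl|rfl|rfl|rfl|rfl|rfl|rfl|rfl|rfl|rfl|rfl|rfl|rfl|rfl|rfl|rfl|rfl <;>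
              simp only [beq_iff_eq] <;> rintro rfl <;>
              first
                | exact h1 (by decide) | exact h2 (by decide)
                | exact h3 (by decide) | exact h4 (by decide)
          simp [PySem.Dict.get?, hf]

-- the four rule sets are pairwise disjoint
lemma pvMem1 {t : String} (h : t ∈ pvR1) : t ∉ pvR2 ∧ t ∉ pvR3 ∧ t ∉ pvR4 := by
  fin_cases h <;> exact ⟨by decide, by decide, by decide⟩

lemma pvMem2 {t : String} (h : t ∈ pvR2) : t ∉ pvR1 ∧ t ∉ pvR3 ∧ t ∉ pvR4 := by
  fin_cases h <;> exact ⟨by decide, by decide, by decide⟩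

lemma pvMem3 {t : String} (h : t ∈ pvR3) : t ∉ pvR1 ∧ t ∉ pvR2 ∧ t ∉ pvR4 := by
  fin_cases h <;> exact ⟨by decide, by decide, by decide⟩

lemma pvMem4 {t : String} (h : t ∈ pvR4) : t ∉ pvR1 ∧ t ∉ pvR2 ∧ t ∉ pvR3 := by
  fin_cases h <;> exact ⟨by decide, by decide, by decide⟩

-- one step of B's loop, by which rule set (if any) the token belongs to
lemma pvStep1 (a b c e : Int) {t : String} (m1 : t ∈ pvR1) :
    (match PySem.Dict.get? pvWordToIntent t with
     | some intent => PySem.Dict.modify (pvDictOf a b c e) intent 0 (fun v => v + 1)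
     | none => pvDictOf a b c e) = pvDictOf (a + 1) b c e := by
  rw [pvIndex_get t, if_pos m1]; rfl

lemma pvStep2 (a b c e : Int) {t : String} (m2 : t ∈ pvR2) :
    (match PySem.Dict.get? pvWordToIntent t with
     | some intent => PySem.Dict.modify (pvDictOf a b c e) intent 0 (fun v => v + 1)
     | none => pvDictOf a b c e) = pvDictOf a (b + 1) c e := by
  rw [pvIndex_get t, if_neg (pvMem2 m2).1, if_pos m2]; rfl

lemma pvStep3 (a b c e : Int) {t : String} (m3 : t ∈ pvR3) :
    (match PySem.Dict.get? pvWordToIntent t with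
     | some intent => PySem.Dict.modify (pvDictOf a b c e) intent 0 (fun v => v + 1)
     | none => pvDictOf a b c e) = pvDictOf a b (c + 1) e := by
  rw [pvIndex_get t, if_neg (pvMem3 m3).1, if_neg (pvMem3 m3).2.1, if_pos m3]; rfl

lemma pvStep4 (a b c e : Int) {t : String} (m4 : t ∈ pvR4) :
    (match PySem.Dict.get? pvWordToIntent t with
     | some intent => PySem.Dict.modify (pvDictOf a b c e) intent 0 (fun v => v + 1)
     | none => pvDictOf a b c e) = pvDictOf a b c (e + 1) := by
  rw [pvIndex_get t, if_neg (pvMem4 m4).1, if_neg (pvMem4 m4).2.1, if_neg (pvMem4 m4).2.2]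
  rw [if_pos m4]; rfl

lemma pvStep0 (a b c e : Int) {t : String}
    (n1 : t ∉ pvR1) (n2 : t ∉ pvR2) (n3 : t ∉ pvR3) (n4 : t ∉ pvR4) :
    (match PySem.Dict.get? pvWordToIntent t with
     | some intent => PySem.Dict.modify (pvDictOf a b c e) intent 0 (fun v => v + 1)
     | none => pvDictOf a b c e) = pvDictOf a b c e := by
  rw [pvIndex_get t, if_neg n1, if_neg n2, if_neg n3, if_neg n4]

-- loop invariant of B's counting pass
lemma pvB_fold (L : List String) (a b c e : Int) :
    L.foldl
      (fun d tok =>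
        match PySem.Dict.get? pvWordToIntent tok with
        | some intent => PySem.Dict.modify d intent 0 (fun v => v + 1)
        | none => d) (pvDictOf a b c e) =
      pvDictOf
        (a + (L.countP (fun t => t ∈ pvR1) : Int))
        (b + (L.countP (fun t => t ∈ pvR2) : Int))
        (c + (L.countP (fun t => t ∈ pvR3) : Int))
        (e + (L.countP (fun t => t ∈ pvR4) : Int)) := by
  induction L generalizing a b c e with
  | nil => simp
  | cons t L ih =>
    simp only [List.foldl_cons]
    by_cases m1 : t ∈ pvR1
    · obtain ⟨n2, n3, n4⟩ := pvMem1 m1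
      rw [pvStep1 a b c e m1, ih]
      simp [pvDictOf, m1, n2, n3, n4]
      omega
    · by_cases m2 : t ∈ pvR2
      · obtain ⟨n1, n3, n4⟩ := pvMem2 m2
        rw [pvStep2 a b c e m2, ih]
        simp [pvDictOf, m2, n1, n3, n4]
        omega
      · by_cases m3 : t ∈ pvR3
        · obtain ⟨n1, n2, n4⟩ := pvMem3 m3
          rw [pvStep3 a b c e m3, ih]
          simp [pvDictOf, m3, n1, n2, n4]
          omega
        · by_cases m4 : t ∈ pvR4
          · obtain ⟨n1, n2, n3⟩ := pvMem4 m4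
            rw [pvStep4 a b c e m4, ih]
            simp [pvDictOf, m4, n1, n2, n3]
            omega
          · rw [pvStep0 a b c e m1 m2 m3 m4, ih]
            simp [pvDictOf, m1, m2, m3, m4]

lemma pvB_eq (tokens : List String) :
    infer_segment_intent_alt tokens =
      pvTail (pvDictOf
        (((PySem.Set.ofList tokens).countP (fun t => t ∈ pvR1) : Int))
        (((PySem.Set.ofList tokens).countP (fun t => t ∈ pvR2) : Int))
        (((PySem.Set.ofList tokens).countP (fun t => t ∈ pvR3) : Int))
        (((PySem.Set.ofList tokens).countP (fun t => t ∈ pvR4) : Int))) := by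
  have e1 : infer_segment_intent_alt tokens =
      pvTail ((PySem.Set.ofList tokens).foldl
        (fun d tok =>
          match PySem.Dict.get? pvWordToIntent tok with
          | some intent => PySem.Dict.modify d intent 0 (fun v => v + 1)
          | none => d) (pvDictOf 0 0 0 0)) := rfl
  rw [e1, pvB_fold]
  simp only [zero_add]

-- symmetric counting: #(rule words occurring in tokens) = #(distinct tokens that are rule words)
lemma pvCount_comm (r : List String) (hr : r.Nodup) (tokens : List String) :
    (r.filter (fun x => tokens.contains x)).length =
      (PySem.Set.ofList tokens).countP (fun t => t ∈ r) := by
  rw [List.countP_eq_length_filter]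
  apply List.Perm.length_eq
  rw [List.perm_ext_iff_of_nodup (hr.filter _) (List.Nodup.filter _ (PySem.Set.nodup_ofList tokens))]
  intro a
  simp [List.mem_filter, PySem.Set.mem_ofList, and_comm]

-- ===== VERDICT (by name: the statement is the Claim_ definition above) =====
theorem infer_segment_intent_spec : Claim_equal_infer_segment_intent := by
  intro tokens _
  unfold Spec_infer_segment_intent
  rw [pvA_eq, pvB_eq, pvCount_comm pvR1 (by decide), pvCount_comm pvR2 (by decide),
      pvCount_comm pvR3 (by decide), pvCount_comm pvR4 (by decide)]
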